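-- pv_equiv track=rewrite | github.com/risc-mi/slab-synthesis | libs/util/misc.py | split_prefix_number
-- ===== SOURCE A (Python) =====
-- def split_prefix_number(val: str):
--     idx = next((idx for idx, c in enumerate(val) if c.isdigit()), None)
--     if idx is None:
--         raise RuntimeError("No numeric part in '{}'".format(val))
--     prefix = val[:idx]
--     number = val[idx:]
--     if not number.isdigit():
--         raise RuntimeError("Numeric part of '{}' contains non-digits".format(val))
--
--     return prefix, int(number)
-- ===== SOURCE B (Python) =====
-- def split_prefix_number(val: str):
--     prefix = []
--     number = []
--     seen_digit = False
--     for c in val: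
--         if c.isdigit():
--             seen_digit = True
--             number.append(c)
--         elif seen_digit:
--             raise RuntimeError("Numeric part of '{}' contains non-digits".format(val))
--         else:
--             prefix.append(c)
--     if not seen_digit:
--         raise RuntimeError("No numeric part in '{}'".format(val))
--     return ''.join(prefix), int(''.join(number))
-- ===== Notes on version B (the rewrite author's own statement) =====
-- stated objective: alternative
-- what changed: Replaces A's three phases (find first digit index, slice twice, rescan the suffix with isdigit) by a single left-to-right pass with a seen_digit state and two buffers, raising on the first offending character.
import Mathlib
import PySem

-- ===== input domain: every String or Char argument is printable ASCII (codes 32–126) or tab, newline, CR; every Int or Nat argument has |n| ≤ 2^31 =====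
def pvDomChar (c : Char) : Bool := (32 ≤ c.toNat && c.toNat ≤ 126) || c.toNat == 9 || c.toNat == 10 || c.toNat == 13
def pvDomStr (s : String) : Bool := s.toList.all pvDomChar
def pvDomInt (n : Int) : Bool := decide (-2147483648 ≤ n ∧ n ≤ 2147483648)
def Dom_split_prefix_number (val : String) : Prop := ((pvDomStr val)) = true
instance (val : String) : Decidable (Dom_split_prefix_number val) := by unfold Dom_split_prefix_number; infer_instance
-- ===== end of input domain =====

-- B replaces A's find-index/slice/rescan phases by one left-to-right pass with a seen_digit state; same cost, different decomposition.

-- ===== PORT A =====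
-- A: find the first digit index; raise if none; slice prefix/number; raise unless number.isdigit(); return (prefix, int(number)).
-- The two 'raise RuntimeError' branches are outside Pre_; the port returns ("", 0) there.
def split_prefix_number (val : String) : String × Int :=
  let cs := val.toList
  match cs.findIdx? (fun c => PySem.Chars.isdigit c) with
  | none => ("", 0)                                   -- RuntimeError "No numeric part"
  | some idx =>
    let pre := PySem.Chars.slice cs none (some (idx : Int))       -- val[:idx]
    let number := PySem.Chars.slice cs (some (idx : Int)) none    -- val[idx:]
    if PySem.Chars.strIsdigit number then
      (String.mk pre, (PySem.Int.ofChars? number).getD 0)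
    else ("", 0)                                      -- RuntimeError "contains non-digits"

-- ===== PORT B =====
-- B's single pass: state = (prefix buffer, number buffer, seen_digit); none = one of B's raises.
def pvAltGo : List Char → List Char → List Char → Bool → Option (List Char × List Char)
  | [], pre, num, seen => if seen then some (pre, num) else none  -- "No numeric part"
  | c :: rest, pre, num, seen =>
    if PySem.Chars.isdigit c then pvAltGo rest pre (num ++ [c]) true
    else if seen then none                                        -- "contains non-digits"
    else pvAltGo rest (pre ++ [c]) num seen

def split_prefix_number_alt (val : String) : String × Int :=
  match pvAltGo val.toList [] [] false with
  | some (pre, num) => (String.mk pre, (PySem.Int.ofChars? num).getD 0)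
  | none => ("", 0)

-- ===== PRECONDITION & SPEC =====
-- Pre_: A raises RuntimeError unless the string has a digit and everything from the first digit on is a digit.
def Pre_split_prefix_number (val : String) : Prop :=
  val.toList.dropWhile (fun c => !PySem.Chars.isdigit c) ≠ [] ∧
  (val.toList.dropWhile (fun c => !PySem.Chars.isdigit c)).all PySem.Chars.isdigit = true
instance (val : String) : Decidable (Pre_split_prefix_number val) := by
  unfold Pre_split_prefix_number; infer_instance

def pvWitness_split_prefix_number : String := "slab42"

def Spec_split_prefix_number (val : String) (out : String × Int) : Prop := out = split_prefix_number_alt val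
instance (val : String) (out : String × Int) : Decidable (Spec_split_prefix_number val out) := by unfold Spec_split_prefix_number; infer_instance

-- ===== CLAIM (what is proved, stated in full; the proofs are below) =====
def Claim_equal_split_prefix_number : Prop := ∀ (val : String), Dom_split_prefix_number val → Pre_split_prefix_number val → Spec_split_prefix_number val (split_prefix_number val)

-- ===== LEMMAS AND PROOFS =====

-- findIdx? points at the length of the non-digit takeWhile prefix when a digit exists.
theorem pv_findIdx?_eq_takeWhile_length (q : Char → Bool) :
    ∀ cs : List Char, cs.dropWhile (fun c => !q c) ≠ [] →
      cs.findIdx? q = some (cs.takeWhile (fun c => !q c)).length := by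
  intro cs
  induction cs with
  | nil => intro h; simp at h
  | cons c rest ih =>
    intro h
    by_cases hq : q c
    · simp [List.findIdx?_cons, hq, List.takeWhile_cons, hq]
    · simp only [List.dropWhile_cons, hq, Bool.not_false, if_pos] at h
      simp [List.findIdx?_cons, hq, ih h]

-- B's loop skips a block of non-digits, moving it into the prefix buffer.
theorem pv_altGo_skip : ∀ (s t pre num : List Char),
    s.all (fun c => !PySem.Chars.isdigit c) = true →
    pvAltGo (s ++ t) pre num false = pvAltGo t (pre ++ s) num false := by
  intro s
  induction s with
  | nil => intro t pre num _; simp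
  | cons c rest ih =>
    intro t pre num h
    simp only [List.all_cons, Bool.and_eq_true, Bool.not_eq_true'] at h
    simp only [List.cons_append, pvAltGo, h.1, Bool.false_eq_true, if_false]
    rw [ih t (pre ++ [c]) num h.2]
    simp

-- Once a digit is seen, a block of digits is appended to the number buffer.
theorem pv_altGo_digits : ∀ (t pre num : List Char),
    t.all PySem.Chars.isdigit = true →
    pvAltGo t pre num true = some (pre, num ++ t) := by
  intro t
  induction t with
  | nil => intro pre num _; simp [pvAltGo]
  | cons c rest ih =>
    intro pre num h
    simp only [List.all_cons, Bool.and_eq_true] at h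
    simp only [pvAltGo, h.1, if_pos]
    rw [ih pre (num ++ [c]) h.2]
    simp

-- ===== VERDICT (by name: the statement is the Claim_ definition above) =====
theorem split_prefix_number_spec : Claim_equal_split_prefix_number := by
  intro val _ hpre
  obtain ⟨hne, hall⟩ := hpre
  unfold Spec_split_prefix_number split_prefix_number split_prefix_number_alt
  set cs := val.toList with hcs
  set p : Char → Bool := fun c => !PySem.Chars.isdigit c with hp
  have hsplit : cs.takeWhile p ++ cs.dropWhile p = cs := List.takeWhile_append_dropWhile
  have hidx : cs.findIdx? (fun c => PySem.Chars.isdigit c) = some (cs.takeWhile p).length :=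
    pv_findIdx?_eq_takeWhile_length _ cs hne
  -- B side
  have htake : (cs.takeWhile p).all (fun c => !PySem.Chars.isdigit c) = true := by
    rw [List.all_eq_true]; intro c hc
    exact List.mem_takeWhile_imp (p := p) hc
  have hB : pvAltGo cs [] [] false = some (cs.takeWhile p, cs.dropWhile p) := by
    conv_lhs => rw [← hsplit]
    rw [pv_altGo_skip _ _ _ _ htake]
    obtain ⟨d, t', hdt⟩ := List.exists_cons_of_ne_nil hne
    have hall' := hall
    rw [hdt, List.all_cons, Bool.and_eq_true] at hall'
    rw [hdt]
    simp only [pvAltGo, hall'.1, if_pos]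
    rw [pv_altGo_digits _ _ _ hall'.2]
    simp
  -- A side slices
  have hpre' : PySem.Chars.slice cs none (some ((cs.takeWhile p).length : Int)) = cs.takeWhile p := by
    rw [PySem.Chars.slice_eq_listSlice, PySem.List.slice_to_natCast]
    exact (List.prefix_iff_eq_take.mp (List.takeWhile_prefix p)).symm
  have hnum : PySem.Chars.slice cs (some ((cs.takeWhile p).length : Int)) none = cs.dropWhile p := by
    rw [PySem.Chars.slice_eq_listSlice, PySem.List.slice_from_natCast]
    have h := congrArg (List.drop (cs.takeWhile p).length) hsplit
    rw [List.drop_left] at h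
    exact h.symm
  have hisd : PySem.Chars.strIsdigit (cs.dropWhile p) = true := by
    simp [PySem.Chars.strIsdigit, hall, hne]
  simp only [hidx, hB, hpre', hnum, hisd, if_pos]
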